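-- pv_equiv track=rewrite | github.com/filippak/rc-answer-generation | model/evaluation/eval.py | get_token_segments
-- ===== SOURCE A (Python) =====
-- def get_token_segments(labels, word_ids):
--     """
--     Function to extract correctly formatted answers
--
--     Input: array of labels (can be predicted labels, or true labels)
--     Output: array of tuples; (start index of answer, length of answer)
--     """
--     prev_word_id = None
--     labels_stats = []
--     for idx, label in enumerate(labels):
--         if label == 1 and word_ids[idx] != prev_word_id:
--             count = 1
--             prev_word_id = word_ids[idx]
--             while idx+count < len(labels):
--                 next_label = labels[idx+count]
--                 if next_label == 0:
--                     break
--                 if next_label == 1 and word_ids[idx+count] != prev_word_id: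
--                     break
--                 count += 1
--             labels_stats.append((idx, count))
--     return labels_stats
-- ===== SOURCE B (Python) =====
-- def get_token_segments(labels, word_ids):
--     """Single flat state-machine pass: open/close segments as we go instead of
--     an inner lookahead while-loop; prev_word_id persists across segments."""
--     prev_word_id = None
--     start = None
--     labels_stats = []
--     for idx, label in enumerate(labels):
--         if start is not None:
--             if label == 0:
--                 labels_stats.append((start, idx - start))
--                 start = None
--             elif label == 1 and word_ids[idx] != prev_word_id:
--                 labels_stats.append((start, idx - start))
--                 start = idx
--                 prev_word_id = word_ids[idx]
--         elif label == 1 and word_ids[idx] != prev_word_id: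
--             start = idx
--             prev_word_id = word_ids[idx]
--     if start is not None:
--         labels_stats.append((start, len(labels) - start))
--     return labels_stats
-- ===== Notes on version B (the rewrite author's own statement) =====
-- stated objective: simpler
-- what changed: Replaces the outer-loop-plus-inner-while lookahead (which re-scans each segment) by a single flat state-machine pass over enumerate(labels) that opens a segment, closes it when it sees a 0 or a new word id, and flushes at the end; prev_word_id persists across segments exactly as in A.
import Mathlib
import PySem

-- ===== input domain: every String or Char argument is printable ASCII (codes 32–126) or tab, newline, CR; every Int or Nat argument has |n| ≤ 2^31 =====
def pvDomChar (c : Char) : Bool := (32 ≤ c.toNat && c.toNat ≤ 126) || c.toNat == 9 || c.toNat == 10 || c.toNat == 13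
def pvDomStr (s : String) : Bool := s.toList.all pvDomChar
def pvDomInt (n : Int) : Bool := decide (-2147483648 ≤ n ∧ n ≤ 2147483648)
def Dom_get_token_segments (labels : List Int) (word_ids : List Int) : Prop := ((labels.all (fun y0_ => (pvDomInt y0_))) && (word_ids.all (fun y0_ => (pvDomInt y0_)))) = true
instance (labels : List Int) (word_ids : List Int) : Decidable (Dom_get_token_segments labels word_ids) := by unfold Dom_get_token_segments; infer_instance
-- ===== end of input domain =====

-- B replaces A's outer-loop-plus-inner-while lookahead with a single flat
-- state-machine pass (open/close segments on the fly); objective: simpler.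


-- ===== PORT A =====
-- A's inner `while idx+count < len(labels)` lookahead; `word_ids[idx+count]` is only
-- read when labels[idx+count] == 1 (short-circuit), in range under Pre_, so getD is exact there.
def aCount (labels word_ids : List Int) (s : Nat) (w : Int) (count : Nat) : Nat :=
  if h : s + count < labels.length then
    let next := labels.getD (s + count) 0
    if next = 0 then count
    else if next = 1 ∧ word_ids.getD (s + count) 0 ≠ w then count
    else aCount labels word_ids s w (count + 1)
  else count
termination_by labels.length - (s + count)
decreasing_by omega

-- A's `for idx, label in enumerate(labels)` loop as index recursion; prev_word_id : Option Int
-- (None = none); `word_ids[idx]` read only when label == 1, in range under Pre_.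
def aLoop (labels word_ids : List Int) (prev : Option Int) (acc : List (Int × Int)) (idx : Nat) : List (Int × Int) :=
  if h : idx < labels.length then
    let label := labels.getD idx 0
    if label = 1 ∧ some (word_ids.getD idx 0) ≠ prev then
      let w := word_ids.getD idx 0
      aLoop labels word_ids (some w)
        (acc ++ [((idx : Int), (aCount labels word_ids idx w 1 : Int))]) (idx + 1)
    else aLoop labels word_ids prev acc (idx + 1)
  else acc
termination_by labels.length - idx
decreasing_by all_goals omega

def get_token_segments (labels : List Int) (word_ids : List Int) : List (Int × Int) :=
  aLoop labels word_ids none [] 0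

-- ===== PORT B =====
-- B's single state-machine pass: state = (prev_word_id, open-segment start, output);
-- end-of-list flush in the terminal branch.
def bLoop (labels word_ids : List Int) (prev : Option Int) (start : Option Nat) (acc : List (Int × Int)) (idx : Nat) : List (Int × Int) :=
  if h : idx < labels.length then
    let label := labels.getD idx 0
    match start with
    | some s =>
      if label = 0 then
        bLoop labels word_ids prev none (acc ++ [((s : Int), (idx : Int) - (s : Int))]) (idx + 1)
      else if label = 1 ∧ some (word_ids.getD idx 0) ≠ prev then
        bLoop labels word_ids (some (word_ids.getD idx 0)) (some idx)
          (acc ++ [((s : Int), (idx : Int) - (s : Int))]) (idx + 1)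
      else bLoop labels word_ids prev (some s) acc (idx + 1)
    | none =>
      if label = 1 ∧ some (word_ids.getD idx 0) ≠ prev then
        bLoop labels word_ids (some (word_ids.getD idx 0)) (some idx) acc (idx + 1)
      else bLoop labels word_ids prev none acc (idx + 1)
  else
    match start with
    | some s => acc ++ [((s : Int), (labels.length : Int) - (s : Int))]
    | none => acc
termination_by labels.length - idx
decreasing_by all_goals omega

def get_token_segments_alt (labels : List Int) (word_ids : List Int) : List (Int × Int) :=
  bLoop labels word_ids none none [] 0

-- ===== PRECONDITION & SPEC =====
-- Exactly the inputs on which the Python A returns: word_ids[i] is read precisely at the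
-- positions i with labels[i] == 1, so A raises IndexError iff some such i is out of range.
def Pre_get_token_segments (labels : List Int) (word_ids : List Int) : Prop :=
  ∀ i, (h : i < labels.length) → labels[i] = 1 → i < word_ids.length
instance (labels : List Int) (word_ids : List Int) : Decidable (Pre_get_token_segments labels word_ids) := by unfold Pre_get_token_segments; infer_instance

def pvWitness_get_token_segments : List Int × List Int := ([1, 1, 0, 1], [0, 1, 1, 0])

def Spec_get_token_segments (labels : List Int) (word_ids : List Int) (out : List (Int × Int)) : Prop := out = get_token_segments_alt labels word_ids
instance (labels : List Int) (word_ids : List Int) (out : List (Int × Int)) : Decidable (Spec_get_token_segments labels word_ids out) := by unfold Spec_get_token_segments; infer_instance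

-- ===== CLAIM (what is proved, stated in full; the proofs are below) =====
def Claim_equal_get_token_segments : Prop := ∀ (labels : List Int) (word_ids : List Int), Dom_get_token_segments labels word_ids → Pre_get_token_segments labels word_ids → Spec_get_token_segments labels word_ids (get_token_segments labels word_ids)

-- ===== LEMMAS AND PROOFS =====

-- Combined invariant, strong induction on labels.length - idx:
-- OUT: out of a segment both loops agree (same prev);
-- IN : while a segment opened at s is pending in B, A has already committed
--      (s, aCount … s w k) where idx = s + k, and the two loops agree.
theorem loop_agree (labels word_ids : List Int) :
    ∀ m idx, labels.length - idx = m →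
      (∀ prev acc, aLoop labels word_ids prev acc idx = bLoop labels word_ids prev none acc idx) ∧
      (∀ s k w acc, idx = s + k → s + k ≤ labels.length →
        aLoop labels word_ids (some w) (acc ++ [((s : Int), (aCount labels word_ids s w k : Int))]) idx
          = bLoop labels word_ids (some w) (some s) acc idx) := by
  intro m
  induction m using Nat.strong_induction_on with
  | _ m ih =>
    intro idx hm
    constructor
    · intro prev acc
      by_cases h : idx < labels.length
      · rw [aLoop, bLoop]
        simp only [dif_pos h]
        by_cases hc : labels.getD idx 0 = 1 ∧ some (word_ids.getD idx 0) ≠ prev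
        · simp only [if_pos hc]
          exact ((ih (labels.length - (idx+1)) (by omega) (idx+1) rfl).2) idx 1
            (word_ids.getD idx 0) acc rfl (by omega)
        · simp only [if_neg hc]
          exact ((ih (labels.length - (idx+1)) (by omega) (idx+1) rfl).1) prev acc
      · rw [aLoop, bLoop]; simp only [dif_neg h]
    · intro s k w acc hidx hle
      by_cases h : idx < labels.length
      · rw [aLoop, bLoop]
        simp only [dif_pos h]
        by_cases h0 : labels.getD idx 0 = 0
        · -- segment closes here in B; aCount stops at k
          have hcnt : aCount labels word_ids s w k = k := by
            rw [aCount]; simp only [← hidx, dif_pos h, if_pos h0]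
          have hc : ¬ (labels.getD idx 0 = 1 ∧ some (word_ids.getD idx 0) ≠ some w) := by
            intro hc; rw [h0] at hc; exact one_ne_zero hc.1.symm
          simp only [if_pos h0, if_neg hc, hcnt]
          rw [show ((s : Int), (idx : Int) - (s : Int)) = ((s : Int), (k : Int)) by
            subst hidx; congr 1; push_cast; ring]
          exact ((ih (labels.length - (idx+1)) (by omega) (idx+1) rfl).1) (some w)
            (acc ++ [((s : Int), (k : Int))])
        · by_cases h1 : labels.getD idx 0 = 1 ∧ some (word_ids.getD idx 0) ≠ some w
          · -- new word id: B closes and reopens; A commits a fresh aCount at idx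
            have hcnt : aCount labels word_ids s w k = k := by
              rw [aCount]
              simp only [← hidx, dif_pos h, if_neg h0]
              have : labels.getD idx 0 = 1 ∧ word_ids.getD idx 0 ≠ w := by
                refine ⟨h1.1, fun he => h1.2 (by rw [he])⟩
              rw [if_pos this]
            simp only [if_neg h0, if_pos h1, hcnt]
            have := ((ih (labels.length - (idx+1)) (by omega) (idx+1) rfl).2) idx 1
              (word_ids.getD idx 0) (acc ++ [((s : Int), (k : Int))]) rfl (by omega)
            rw [show ((s : Int), (idx : Int) - (s : Int)) = ((s : Int), (k : Int)) by
              subst hidx; congr 1; push_cast; ring]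
            exact this
          · -- segment continues; aCount steps to k+1
            have hcnt : aCount labels word_ids s w k = aCount labels word_ids s w (k + 1) := by
              rw [aCount]
              simp only [← hidx, dif_pos h, if_neg h0]
              have : ¬ (labels.getD idx 0 = 1 ∧ word_ids.getD idx 0 ≠ w) := by
                intro hc; exact h1 ⟨hc.1, fun he => hc.2 (Option.some.injEq _ _ ▸ he)⟩
              rw [if_neg this]
            simp only [if_neg h0, if_neg h1, hcnt]
            have := ((ih (labels.length - (idx+1)) (by omega) (idx+1) rfl).2) s (k + 1) w acc
              (by omega) (by omega)
            exact this
      · -- end of list: aCount returns k, B flushes (s, n - s); idx = n so k = n - s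
        have hn : idx = labels.length := by omega
        have hcnt : aCount labels word_ids s w k = k := by
          rw [aCount]; simp only [← hidx, dif_neg h]
        rw [aLoop, bLoop]
        simp only [dif_neg h, hcnt]
        rw [show ((s : Int), ((labels.length : Int)) - (s : Int)) = ((s : Int), (k : Int)) by
          congr 1; omega]

-- ===== VERDICT (by name: the statement is the Claim_ definition above) =====
theorem get_token_segments_spec : Claim_equal_get_token_segments := by
  intro labels word_ids _ _
  unfold Spec_get_token_segments get_token_segments get_token_segments_alt
  exact ((loop_agree labels word_ids (labels.length - 0) 0 rfl).1) none []
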